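-- pv_equiv track=rewrite | github.com/PhilCauss/arx | src/arx/wrapper.py | get_packages_to_install
-- ===== SOURCE A (Python) =====
-- from typing import List, Optional
--
-- def get_packages_to_install(args: List[str]) -> List[str]:
--     """Extract package names from yay arguments"""
--     packages = []
--     i = 0
--     while i < len(args):
--         arg = args[i]
--         if arg in ['-S', '--sync'] and i + 1 < len(args):
--             # Handle -S flag
--             i += 1
--             while i < len(args) and not args[i].startswith('-'):
--                 packages.append(args[i])
--                 i += 1
--         elif not arg.startswith('-') and arg not in ['install', 'remove', 'update']:
--             # Direct package names
--             packages.append(arg)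
--         i += 1
--     return packages
-- ===== SOURCE B (Python) =====
-- def get_packages_to_install(args):
--     """Extract package names from yay arguments"""
--     packages = []
--     sync = False
--     for arg in args:
--         if sync:
--             if arg.startswith('-'):
--                 sync = False  # the dash arg that ends a sync run is consumed
--             else:
--                 packages.append(arg)
--         elif arg in ('-S', '--sync'):
--             sync = True
--         elif not arg.startswith('-') and arg not in ('install', 'remove', 'update'):
--             packages.append(arg)
--     return packages
-- ===== Notes on version B (the rewrite author's own statement) =====
-- stated objective: simpler
-- what changed: Replaces the nested index-based while loops (inner loop consuming the run of package names after -S/--sync) with a single flat for-pass over the args carrying a boolean sync state; the redundant i+1<len guard disappears since entering sync state at the last argument appends nothing anyway.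
import Mathlib
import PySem

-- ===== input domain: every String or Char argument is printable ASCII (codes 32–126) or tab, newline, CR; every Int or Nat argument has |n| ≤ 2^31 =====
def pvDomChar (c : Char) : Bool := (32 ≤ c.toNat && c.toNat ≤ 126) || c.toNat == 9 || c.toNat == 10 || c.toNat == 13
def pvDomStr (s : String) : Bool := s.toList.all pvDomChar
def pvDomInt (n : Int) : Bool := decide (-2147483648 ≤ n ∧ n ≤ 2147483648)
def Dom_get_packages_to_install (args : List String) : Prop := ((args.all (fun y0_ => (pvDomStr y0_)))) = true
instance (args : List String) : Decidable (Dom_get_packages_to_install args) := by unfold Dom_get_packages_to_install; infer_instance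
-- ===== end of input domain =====

-- B replaces A's nested index-based while loops by one flat pass carrying a boolean sync state (objective: simpler).

-- ===== PORT A =====
-- inner while loop of A: consumes the run of non-dash args after -S/--sync, returns (final i, packages).
-- fuel is only a structural-termination guard: each iteration advances i, so fuel = args.length never runs out.
def innerA (args : List String) (fuel : Nat) (i : Nat) (packages : List String) : Nat × List String :=
  match fuel with
  | 0 => (i, packages)
  | fuel + 1 =>
    if h : i < args.length then
      if ¬ PySem.Str.startswith args[i] "-" then
        innerA args fuel (i+1) (packages ++ [args[i]])
      else (i, packages)
    else (i, packages)

-- outer while loop of A (same fuel guard: i strictly increases each iteration)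
def outerA (args : List String) (fuel : Nat) (i : Nat) (packages : List String) : List String :=
  match fuel with
  | 0 => packages
  | fuel + 1 =>
    if h : i < args.length then
      if (args[i] = "-S" ∨ args[i] = "--sync") ∧ i + 1 < args.length then
        outerA args fuel ((innerA args args.length (i+1) packages).1 + 1)
          (innerA args args.length (i+1) packages).2
      else if ¬ PySem.Str.startswith args[i] "-" ∧
          ¬ (args[i] = "install" ∨ args[i] = "remove" ∨ args[i] = "update") then
        outerA args fuel (i+1) (packages ++ [args[i]])
      else outerA args fuel (i+1) packages
    else packages

def get_packages_to_install (args : List String) : List String :=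
  outerA args args.length 0 []

-- ===== PORT B =====
-- loop body of B: one flat pass, state = (sync flag, packages so far)
def stepB (st : Bool × List String) (arg : String) : Bool × List String :=
  if st.1 then
    if PySem.Str.startswith arg "-" then (false, st.2)
    else (true, st.2 ++ [arg])
  else if arg = "-S" ∨ arg = "--sync" then (true, st.2)
  else if ¬ PySem.Str.startswith arg "-" ∧
      ¬ (arg = "install" ∨ arg = "remove" ∨ arg = "update") then
    (false, st.2 ++ [arg])
  else (false, st.2)

def get_packages_to_install_alt (args : List String) : List String :=
  (args.foldl stepB (false, [])).2

-- ===== PRECONDITION & SPEC =====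
def Spec_get_packages_to_install (args : List String) (out : List String) : Prop := out = get_packages_to_install_alt args
instance (args : List String) (out : List String) : Decidable (Spec_get_packages_to_install args out) := by unfold Spec_get_packages_to_install; infer_instance

-- ===== CLAIM (what is proved, stated in full; the proofs are below) =====
def Claim_equal_get_packages_to_install : Prop := ∀ (args : List String), Dom_get_packages_to_install args → Spec_get_packages_to_install args (get_packages_to_install args)

-- ===== LEMMAS AND PROOFS =====

-- the inner loop never moves i backwards
theorem innerA_fst_ge (args : List String) (fuel : Nat) :
    ∀ i p, i ≤ (innerA args fuel i p).1 := by
  induction fuel with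
  | zero => intro i p; simp [innerA]
  | succ fuel ih =>
      intro i p
      by_cases h : i < args.length
      · by_cases hs : PySem.Str.startswith args[i] "-"
        · have hs' : PySem.Chars.startswith args[i].toList ['-'] = true := by
            simpa [PySem.Str.startswith] using hs
          simp [innerA, h, hs']
        · have := ih (i+1) (p ++ [args[i]])
          simp only [innerA, dif_pos h, if_pos hs]
          omega
      · simp [innerA, h]

-- B in sync state folds like A's inner loop followed by skipping the terminating dash arg
theorem inner_fold (args : List String) (fuel : Nat) :
    ∀ i p, args.length ≤ fuel + i →
    (List.foldl stepB (true, p) (args.drop i)).2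
      = (List.foldl stepB (false, (innerA args fuel i p).2)
          (args.drop ((innerA args fuel i p).1 + 1))).2 := by
  induction fuel with
  | zero =>
      intro i p hf
      have h1 : args.drop i = [] := List.drop_eq_nil_of_le (by omega)
      have h2 : args.drop (i + 1) = [] := List.drop_eq_nil_of_le (by omega)
      simp [innerA, h1, h2]
  | succ fuel ih =>
      intro i p hf
      by_cases h : i < args.length
      · by_cases hs : PySem.Str.startswith args[i] "-"
        · have hs' : PySem.Chars.startswith args[i].toList ['-'] = true := by
            simpa [PySem.Str.startswith] using hs
          have hstep : innerA args (fuel+1) i p = (i, p) := by simp [innerA, h, hs']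
          have hst : stepB (true, p) args[i] = (false, p) := by simp [stepB, hs']
          rw [hstep, List.drop_eq_getElem_cons h]
          simp only [List.foldl_cons]
          rw [hst]
        · have hs' : PySem.Chars.startswith args[i].toList ['-'] = false := by
            simpa [PySem.Str.startswith] using hs
          have hstep : innerA args (fuel+1) i p = innerA args fuel (i+1) (p ++ [args[i]]) := by
            simp [innerA, h, hs']
          have hst : stepB (true, p) args[i] = (true, p ++ [args[i]]) := by simp [stepB, hs']
          rw [hstep, List.drop_eq_getElem_cons h]
          simp only [List.foldl_cons]
          rw [hst]
          exact ih (i+1) (p ++ [args[i]]) (by omega)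
      · have h1 : args.drop i = [] := List.drop_eq_nil_of_le (by omega)
        have h2 : args.drop (i + 1) = [] := List.drop_eq_nil_of_le (by omega)
        simp [innerA, h, h1, h2]

theorem outer_fold (args : List String) (fuel : Nat) :
    ∀ i p, args.length ≤ fuel + i →
    outerA args fuel i p = (List.foldl stepB (false, p) (args.drop i)).2 := by
  induction fuel with
  | zero =>
      intro i p hf
      have h1 : args.drop i = [] := List.drop_eq_nil_of_le (by omega)
      simp [outerA, h1]
  | succ fuel ih =>
      intro i p hf
      by_cases h : i < args.length
      · by_cases hg : (args[i] = "-S" ∨ args[i] = "--sync") ∧ i + 1 < args.length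
        · -- A runs the inner loop; B enters sync state
          have hstep : outerA args (fuel+1) i p
              = outerA args fuel ((innerA args args.length (i+1) p).1 + 1)
                  (innerA args args.length (i+1) p).2 := by
            simp [outerA, h, hg]
          have hj := innerA_fst_ge args args.length (i+1) p
          have hst : stepB (false, p) args[i] = (true, p) := by
            rcases hg.1 with hs | hs <;> simp [stepB, hs]
          rw [hstep, ih _ _ (by omega), List.drop_eq_getElem_cons h]
          simp only [List.foldl_cons]
          rw [hst, ← inner_fold args args.length (i+1) p (by omega)]
        · by_cases hp : ¬ PySem.Str.startswith args[i] "-" ∧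
              ¬ (args[i] = "install" ∨ args[i] = "remove" ∨ args[i] = "update")
          · -- plain package name
            obtain ⟨hnd, hnl⟩ := hp
            have hS : args[i] ≠ "-S" := by
              intro e; rw [e] at hnd; exact hnd (by decide)
            have hSy : args[i] ≠ "--sync" := by
              intro e; rw [e] at hnd; exact hnd (by decide)
            have hnd' : PySem.Chars.startswith args[i].toList ['-'] = false := by
              simpa [PySem.Str.startswith] using hnd
            have hstep : outerA args (fuel+1) i p = outerA args fuel (i+1) (p ++ [args[i]]) := by
              simp [outerA, h, hg, hnd', hnl]
            have hst : stepB (false, p) args[i] = (false, p ++ [args[i]]) := by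
              simp [stepB, hS, hSy, hnd', hnl]
            rw [hstep, ih _ _ (by omega), List.drop_eq_getElem_cons h]
            simp only [List.foldl_cons]
            rw [hst]
          · -- skipped arg
            have hstep : outerA args (fuel+1) i p = outerA args fuel (i+1) p := by
              simp only [outerA, dif_pos h, if_neg hg, if_neg hp]
            by_cases hw : args[i] = "-S" ∨ args[i] = "--sync"
            · -- sync word at the last position: A appends nothing, B enters sync on an empty tail
              have hlast : ¬ i + 1 < args.length := fun hl => hg ⟨hw, hl⟩
              have h2 : args.drop (i + 1) = [] := List.drop_eq_nil_of_le (by omega)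
              have hst : stepB (false, p) args[i] = (true, p) := by
                rcases hw with hs | hs <;> simp [stepB, hs]
              rw [hstep, ih _ _ (by omega), List.drop_eq_getElem_cons h]
              simp only [List.foldl_cons]
              rw [hst, h2]; rfl
            · have hst : stepB (false, p) args[i] = (false, p) := by
                simp only [stepB]
                rw [if_neg (by simp), if_neg hw, if_neg hp]
              rw [hstep, ih _ _ (by omega), List.drop_eq_getElem_cons h]
              simp only [List.foldl_cons]
              rw [hst]
      · have h1 : args.drop i = [] := List.drop_eq_nil_of_le (by omega)
        simp [outerA, h, h1]

-- ===== VERDICT (by name: the statement is the Claim_ definition above) =====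
theorem get_packages_to_install_spec : Claim_equal_get_packages_to_install := by
  intro args _
  unfold Spec_get_packages_to_install get_packages_to_install get_packages_to_install_alt
  simpa using outer_fold args args.length 0 [] (by omega)
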